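-- pv_equiv track=rewrite | github.com/MingosGit/UB | Tercero/Primer Semestre/IA/P2_BASE/aichess.py | _rook_attacks
-- ===== SOURCE A (Python) =====
-- def _rook_attacks(from_pos, to_pos, occupied):
--     if from_pos is None or to_pos is None:
--         return False
--     r1, c1 = from_pos
--     r2, c2 = to_pos
--     if r1 != r2 and c1 != c2:
--         return False
--     # collect positions strictly between
--     if r1 == r2:
--         rng = range(min(c1, c2) + 1, max(c1, c2))
--         for y in rng:
--             if (r1, y) in occupied:
--                 return False
--         return True
--     else:
--         rng = range(min(r1, r2) + 1, max(r1, r2))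
--         for x in rng:
--             if (x, c1) in occupied:
--                 return False
--         return True
-- ===== SOURCE B (Python) =====
-- def _rook_attacks(from_pos, to_pos, occupied):
--     if from_pos is None or to_pos is None:
--         return False
--     r1, c1 = from_pos
--     r2, c2 = to_pos
--     if r1 != r2 and c1 != c2:
--         return False
--     if r1 == r2:
--         lo, hi = (c1, c2) if c1 < c2 else (c2, c1)
--         return not any(x == r1 and lo < y < hi for (x, y) in occupied)
--     lo, hi = (r1, r2) if r1 < r2 else (r2, r1)
--     return not any(y == c1 and lo < x < hi for (x, y) in occupied)
-- ===== Notes on version B (the rewrite author's own statement) =====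
-- stated objective: alternative
-- what changed: Inverted the loop: instead of enumerating every board square strictly between the two positions and testing each for membership in occupied, B makes a single pass over the occupied list and tests each piece arithmetically for lying strictly between the endpoints on the shared rank/file; the between-squares enumeration disappears entirely.
import Mathlib
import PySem

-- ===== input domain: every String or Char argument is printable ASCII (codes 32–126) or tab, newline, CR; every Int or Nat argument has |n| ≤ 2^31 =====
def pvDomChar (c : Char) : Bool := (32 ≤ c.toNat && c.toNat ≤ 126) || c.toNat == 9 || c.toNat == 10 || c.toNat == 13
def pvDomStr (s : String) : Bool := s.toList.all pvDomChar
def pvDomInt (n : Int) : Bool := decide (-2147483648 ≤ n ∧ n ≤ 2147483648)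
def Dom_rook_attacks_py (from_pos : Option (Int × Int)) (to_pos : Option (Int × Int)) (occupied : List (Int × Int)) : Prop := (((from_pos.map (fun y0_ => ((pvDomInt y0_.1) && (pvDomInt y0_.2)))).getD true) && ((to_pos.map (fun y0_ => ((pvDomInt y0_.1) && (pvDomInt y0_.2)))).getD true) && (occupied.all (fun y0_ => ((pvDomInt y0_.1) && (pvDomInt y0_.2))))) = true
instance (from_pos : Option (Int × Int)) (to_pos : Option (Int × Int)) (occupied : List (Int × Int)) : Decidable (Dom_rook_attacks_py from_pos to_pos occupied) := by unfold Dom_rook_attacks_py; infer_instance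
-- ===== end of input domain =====

-- B inverts the loop: instead of enumerating the squares strictly between the two positions
-- and testing each for membership in occupied, it scans the occupied list once and tests each
-- piece arithmetically for lying strictly between the endpoints on the shared rank/file
-- (objective: alternative single-pass-over-occupied algorithm, same result).

-- ===== PORT A =====
-- the 'for y in rng: if (r1, y) in occupied: return False / return True' loop
def rowLoop (occupied : List (Int × Int)) (r1 : Int) : List Int → Bool
  | [] => true
  | y :: t => if occupied.contains (r1, y) then false else rowLoop occupied r1 t

-- the 'for x in rng: if (x, c1) in occupied: return False / return True' loop
def colLoop (occupied : List (Int × Int)) (c1 : Int) : List Int → Bool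
  | [] => true
  | x :: t => if occupied.contains (x, c1) then false else colLoop occupied c1 t

def rook_attacks_py (from_pos : Option (Int × Int)) (to_pos : Option (Int × Int)) (occupied : List (Int × Int)) : Bool :=
  match from_pos, to_pos with
  | some (r1, c1), some (r2, c2) =>
    if r1 ≠ r2 ∧ c1 ≠ c2 then false
    else if r1 = r2 then
      rowLoop occupied r1 (PySem.List.pyRange (min c1 c2 + 1) (max c1 c2) 1)
    else
      colLoop occupied c1 (PySem.List.pyRange (min r1 r2 + 1) (max r1 r2) 1)
  | _, _ => false

-- ===== PORT B =====
def rook_attacks_py_alt (from_pos : Option (Int × Int)) (to_pos : Option (Int × Int)) (occupied : List (Int × Int)) : Bool :=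
  match from_pos with
  | none => false
  | some (r1, c1) =>
    match to_pos with
    | none => false
    | some (r2, c2) =>
      if r1 ≠ r2 ∧ c1 ≠ c2 then false
      else if r1 = r2 then
        let lo := if c1 < c2 then c1 else c2
        let hi := if c1 < c2 then c2 else c1
        !(occupied.any (fun p => decide (p.1 = r1) && decide (lo < p.2) && decide (p.2 < hi)))
      else
        let lo := if r1 < r2 then r1 else r2
        let hi := if r1 < r2 then r2 else r1
        !(occupied.any (fun p => decide (p.2 = c1) && decide (lo < p.1) && decide (p.1 < hi)))

-- ===== PRECONDITION & SPEC =====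
def Spec_rook_attacks_py (from_pos : Option (Int × Int)) (to_pos : Option (Int × Int)) (occupied : List (Int × Int)) (out : Bool) : Prop := out = rook_attacks_py_alt from_pos to_pos occupied
instance (from_pos : Option (Int × Int)) (to_pos : Option (Int × Int)) (occupied : List (Int × Int)) (out : Bool) : Decidable (Spec_rook_attacks_py from_pos to_pos occupied out) := by unfold Spec_rook_attacks_py; infer_instance

-- ===== CLAIM =====
def Claim_equal_rook_attacks_py : Prop := ∀ (from_pos : Option (Int × Int)) (to_pos : Option (Int × Int)) (occupied : List (Int × Int)), Dom_rook_attacks_py from_pos to_pos occupied → Spec_rook_attacks_py from_pos to_pos occupied (rook_attacks_py from_pos to_pos occupied)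

-- ===== LEMMAS AND PROOFS =====

theorem rowLoop_all (occupied : List (Int × Int)) (r1 : Int) (ys : List Int) :
    rowLoop occupied r1 ys = ys.all (fun y => !occupied.contains (r1, y)) := by
  induction ys with
  | nil => rfl
  | cons y t ih => by_cases h : occupied.contains (r1, y) <;> simp [rowLoop, ih]

theorem colLoop_all (occupied : List (Int × Int)) (c1 : Int) (xs : List Int) :
    colLoop occupied c1 xs = xs.all (fun x => !occupied.contains (x, c1)) := by
  induction xs with
  | nil => rfl
  | cons x t ih => by_cases h : occupied.contains (x, c1) <;> simp [colLoop, ih]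

-- enumerating the between-squares and testing membership equals scanning occupied and
-- testing betweenness (row form: the first coordinate is fixed)
theorem row_scan_eq (occupied : List (Int × Int)) (r lo hi : Int) :
    (PySem.List.pyRange (lo + 1) hi 1).all (fun y => !occupied.contains (r, y))
      = !(occupied.any (fun p => decide (p.1 = r) && decide (lo < p.2) && decide (p.2 < hi))) := by
  rw [Bool.eq_iff_iff]
  simp only [List.all_eq_true, Bool.not_eq_true', List.contains_eq_mem, decide_eq_false_iff_not,
    PySem.List.mem_pyRange_one, List.any_eq_false, Bool.and_eq_true,
    decide_eq_true_eq, not_and]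
  constructor
  · intro h p hp h1 h2
    exact h p.2 ⟨by omega, h2⟩ (by rw [← h1.1]; simpa using hp)
  · intro h y hy hmem
    exact h (r, y) hmem ⟨rfl, by omega⟩ hy.2


-- column form: the second coordinate is fixed
theorem col_scan_eq (occupied : List (Int × Int)) (c lo hi : Int) :
    (PySem.List.pyRange (lo + 1) hi 1).all (fun x => !occupied.contains (x, c))
      = !(occupied.any (fun p => decide (p.2 = c) && decide (lo < p.1) && decide (p.1 < hi))) := by
  rw [Bool.eq_iff_iff]
  simp only [List.all_eq_true, Bool.not_eq_true', List.contains_eq_mem, decide_eq_false_iff_not,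
    PySem.List.mem_pyRange_one, List.any_eq_false, Bool.and_eq_true,
    decide_eq_true_eq, not_and]
  constructor
  · intro h p hp h1 h2
    exact h p.1 ⟨by omega, h2⟩ (by rw [← h1.1]; simpa using hp)
  · intro h x hx hmem
    exact h (x, c) hmem ⟨rfl, by omega⟩ hx.2

-- ===== VERDICT =====
theorem rook_attacks_py_spec : Claim_equal_rook_attacks_py := by
  intro from_pos to_pos occupied _
  unfold Spec_rook_attacks_py rook_attacks_py rook_attacks_py_alt
  match from_pos, to_pos with
  | none, _ => cases to_pos <;> rfl
  | some p, none => rfl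
  | some (r1, c1), some (r2, c2) =>
    simp only
    by_cases hg : r1 ≠ r2 ∧ c1 ≠ c2
    · simp [hg]
    · rw [if_neg hg, if_neg hg]
      by_cases hr : r1 = r2
      · rw [if_pos hr, if_pos hr]
        have hmin : min c1 c2 = if c1 < c2 then c1 else c2 := by
          by_cases h : c1 < c2 <;> simp [h] <;> omega
        have hmax : max c1 c2 = if c1 < c2 then c2 else c1 := by
          by_cases h : c1 < c2 <;> simp [h] <;> omega
        rw [rowLoop_all, hmin, hmax, row_scan_eq]
      · rw [if_neg hr, if_neg hr]
        have hmin : min r1 r2 = if r1 < r2 then r1 else r2 := by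
          by_cases h : r1 < r2 <;> simp [h] <;> omega
        have hmax : max r1 r2 = if r1 < r2 then r2 else r1 := by
          by_cases h : r1 < r2 <;> simp [h] <;> omega
        rw [colLoop_all, hmin, hmax, col_scan_eq]
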